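-- pv_equiv track=rewrite | github.com/AvalZ/regrets | engines/brzozowski/pretty.py | _compact_ranges
-- ===== SOURCE A (Python) =====
-- def _escape_in(c: str) -> str:
--     if c in r'\^]-':
--         return '\\' + c
--     return c
--
-- def _compact_ranges(chars):
--     if not chars:
--         return ''
--     out = []
--     start = prev = chars[0]
--     for c in chars[1:]:
--         if ord(c) == ord(prev) + 1:
--             prev = c
--             continue
--         out.append(_emit_range(start, prev))
--         start = prev = c
--     out.append(_emit_range(start, prev))
--     return ''.join(out)
--
-- def _emit_range(start: str, end: str) -> str:
--     if start == end:
--         return _escape_in(start)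
--     if ord(end) == ord(start) + 1:
--         return _escape_in(start) + _escape_in(end)
--     return f'{_escape_in(start)}-{_escape_in(end)}'
-- ===== SOURCE B (Python) =====
-- def _escape_in(c: str) -> str:
--     if c in r'\^]-':
--         return '\\' + c
--     return c
--
-- def _emit_range(start: str, end: str) -> str:
--     if start == end:
--         return _escape_in(start)
--     if ord(end) == ord(start) + 1:
--         return _escape_in(start) + _escape_in(end)
--     return f'{_escape_in(start)}-{_escape_in(end)}'
--
-- def _compact_ranges(chars):
--     # Group-first: pop each maximal run of consecutive codepoints off a stack
--     # and emit it immediately; no start/prev state carried across iterations.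
--     stack = chars[::-1]
--     out = []
--     while stack:
--         first = last = stack.pop()
--         while stack and ord(stack[-1]) == ord(last) + 1:
--             last = stack.pop()
--         out.append(_emit_range(first, last))
--     return ''.join(out)
-- ===== Notes on version B (the rewrite author's own statement) =====
-- stated objective: alternative
-- what changed: Replaced A's start/prev state machine with a deferred trailing emit by a stack-driven group-first loop that pops each maximal run of consecutive codepoints and emits it immediately, reusing the same _escape_in/_emit_range helpers.
import Mathlib
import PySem

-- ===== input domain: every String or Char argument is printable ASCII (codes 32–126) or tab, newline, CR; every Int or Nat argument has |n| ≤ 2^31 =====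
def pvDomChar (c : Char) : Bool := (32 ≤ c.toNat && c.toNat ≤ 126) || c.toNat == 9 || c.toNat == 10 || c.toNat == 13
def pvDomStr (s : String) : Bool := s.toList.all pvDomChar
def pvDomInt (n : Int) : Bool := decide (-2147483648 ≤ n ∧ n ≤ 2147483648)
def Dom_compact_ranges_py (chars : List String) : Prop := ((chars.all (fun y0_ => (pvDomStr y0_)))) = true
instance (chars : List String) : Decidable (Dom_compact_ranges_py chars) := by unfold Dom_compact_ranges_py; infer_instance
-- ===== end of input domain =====

-- B replaces A's start/prev state machine by a stack-driven group-first loop that pops each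
-- maximal run and emits it immediately (objective: alternative decomposition, same cost).

-- ===== PORT A =====

-- ord(c): exact on single-character strings (all that Pre_ admits where it is evaluated);
-- Python raises TypeError otherwise, which Pre_ excludes.
def pvOrd (s : List Char) : Nat :=
  match s with
  | [c] => c.toNat
  | _ => 0

-- _escape_in; 'c in r"\^]-"' is Python's substring test (PySem.Chars.isIn), '\\' + c prepends.
def escapeIn (c : List Char) : List Char :=
  if PySem.Chars.isIn c ['\\', '^', ']', '-'] then '\\' :: c else c

-- _emit_range
def emitRange (s e : List Char) : List Char :=
  if s = e then escapeIn s
  else if pvOrd e = pvOrd s + 1 then escapeIn s ++ escapeIn e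
  else escapeIn s ++ ['-'] ++ escapeIn e

-- A's for-loop over chars[1:] with state (out, start, prev); the trailing append is the base case.
def aLoop : List (List Char) → List (List Char) → List Char → List Char → List (List Char)
  | [], out, start, prev => out ++ [emitRange start prev]
  | c :: rest, out, start, prev =>
      if pvOrd c = pvOrd prev + 1 then aLoop rest out start c
      else aLoop rest (out ++ [emitRange start prev]) c c

-- ''.join(out) on a list of char-lists is flatten.
def compact_ranges_py (chars : List String) : String :=
  match chars with
  | [] => ""
  | c :: rest => String.ofList ((aLoop (rest.map String.toList) [] c.toList c.toList).flatten)

-- ===== PORT B =====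

-- Source B's inner while: the stack holds the remaining chars with its TOP at the HEAD
-- (Source B builds chars[::-1] and pops from the end, which is the same traversal);
-- returns (last, remaining stack).
def bInner : List Char → List (List Char) → List Char × List (List Char)
  | last, [] => (last, [])
  | last, t :: s => if pvOrd t = pvOrd last + 1 then bInner t s else (last, t :: s)

-- needed by bOuter's decreasing_by
theorem bInner_len_le (last : List Char) (s : List (List Char)) :
    (bInner last s).2.length ≤ s.length := by
  induction s generalizing last with
  | nil => simp [bInner]
  | cons t s ih =>
      simp only [bInner]
      split
      · exact Nat.le_succ_of_le (ih t)
      · simp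

-- Source B's outer while: pop first, consume its run, emit, repeat; out is the accumulator.
def bOuter : List (List Char) → List (List Char) → List (List Char)
  | [], out => out
  | f :: s, out => bOuter (bInner f s).2 (out ++ [emitRange f (bInner f s).1])
termination_by stack _ => stack.length
decreasing_by exact Nat.lt_succ_of_le (bInner_len_le _ _)

def compact_ranges_py_alt (chars : List String) : String :=
  String.ofList ((bOuter (chars.map String.toList) []).flatten)

-- ===== PRECONDITION & SPEC =====
-- Pre_ excludes exactly the inputs where Python's A raises TypeError (ord of a non-single-character
-- string, reached whenever the list has ≥ 2 elements and some element is not a single character);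
-- B raises there too.
def Pre_compact_ranges_py (chars : List String) : Prop :=
  chars.length ≤ 1 ∨ (chars.all (fun s => s.toList.length == 1)) = true
instance (chars : List String) : Decidable (Pre_compact_ranges_py chars) := by
  unfold Pre_compact_ranges_py; infer_instance

def pvWitness_compact_ranges_py : List String := ["a", "b", "c", "x", "]", "^"]

def Spec_compact_ranges_py (chars : List String) (out : String) : Prop := out = compact_ranges_py_alt chars
instance (chars : List String) (out : String) : Decidable (Spec_compact_ranges_py chars out) := by unfold Spec_compact_ranges_py; infer_instance

-- ===== CLAIM (what is proved, stated in full; the proofs are below) =====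
def Claim_equal_compact_ranges_py : Prop := ∀ (chars : List String), Dom_compact_ranges_py chars → Pre_compact_ranges_py chars → Spec_compact_ranges_py chars (compact_ranges_py chars)

-- ===== LEMMAS AND PROOFS =====

-- A's state machine equals B's group-first loop, for any accumulator and run state.
theorem aLoop_eq_bOuter (rest : List (List Char)) :
    ∀ (out : List (List Char)) (start prev : List Char),
      aLoop rest out start prev =
        bOuter (bInner prev rest).2 (out ++ [emitRange start (bInner prev rest).1]) := by
  induction rest with
  | nil => intro out start prev; simp [aLoop, bInner, bOuter]
  | cons c rest ih =>
      intro out start prev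
      simp only [aLoop, bInner]
      by_cases h : pvOrd c = pvOrd prev + 1
      · rw [if_pos h, if_pos h]
        exact ih out start c
      · rw [if_neg h, if_neg h]
        rw [ih (out ++ [emitRange start prev]) c c]
        conv_rhs => rw [bOuter]

theorem ports_agree (chars : List String) :
    compact_ranges_py chars = compact_ranges_py_alt chars := by
  cases chars with
  | nil => simp [compact_ranges_py, compact_ranges_py_alt, bOuter]
  | cons c rest =>
      simp only [compact_ranges_py, compact_ranges_py_alt, List.map_cons]
      rw [aLoop_eq_bOuter]
      conv_rhs => rw [bOuter]

-- ===== VERDICT (by name: the statement is the Claim_ definition above) =====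
theorem compact_ranges_py_spec : Claim_equal_compact_ranges_py := by
  intro chars _ _
  exact ports_agree chars
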